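-- pv_equiv track=rewrite | github.com/turulomio/xulpymoney | xulpymoney/libodfgenerator.py | letter_add
-- ===== SOURCE A (Python) =====
-- def letter_add(letter, number):
--     """Add to columns to letter
--     el ord de A=65
--     el ord de Z=90
--
--     Z es sumar 24
--     """
--
--     maxord=ord(letter)+number
--     result=""
--     while maxord>90:
--         result=result+"A"
--         maxord=maxord-26
--     result=result+chr(maxord)
--     return result
-- ===== SOURCE B (Python) =====
-- def letter_add(letter, number):
--     total = ord(letter) + number
--     k = 0 if total <= 90 else (total - 91) // 26 + 1
--     return "A" * k + chr(total - 26 * k)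
-- ===== Notes on version B (the rewrite author's own statement) =====
-- stated objective: faster
-- what changed: Replaces the repeated-subtraction while-loop with a closed-form computation of the 'A'-prefix length (ceiling division) and one string multiplication.
-- outside the precondition, e.g. on letter_add('AB', 1): A raises TypeError, B raises TypeError; on letter_add(' ', -40): A raises ValueError, B raises ValueError
import Mathlib
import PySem

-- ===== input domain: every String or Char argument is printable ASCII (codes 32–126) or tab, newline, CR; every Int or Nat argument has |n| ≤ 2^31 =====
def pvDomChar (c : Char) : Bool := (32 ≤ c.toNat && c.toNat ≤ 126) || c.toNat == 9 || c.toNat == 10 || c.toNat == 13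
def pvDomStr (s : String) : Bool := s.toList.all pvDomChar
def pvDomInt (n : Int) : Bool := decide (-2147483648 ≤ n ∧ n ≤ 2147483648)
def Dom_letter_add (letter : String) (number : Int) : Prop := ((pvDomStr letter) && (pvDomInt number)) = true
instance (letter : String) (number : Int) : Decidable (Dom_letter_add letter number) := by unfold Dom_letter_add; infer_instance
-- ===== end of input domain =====

-- B replaces A's repeated-subtraction loop by a closed-form prefix length (faster).

-- ===== PORT A =====
-- PySem has no ord/chr: ord(letter) is ported as the code of the single character
-- (Pre_ requires length 1, where ord is exact), chr(m) as Char.ofNat m.toNat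
-- (exact for 0 ≤ m ≤ 90, guaranteed by Pre_; Python raises ValueError for m < 0).
-- The while-loop is the structural recursion letterAddLoopA on the same state.
def letterAddLoopA (result : List Char) (maxord : Int) : List Char × Int :=
  if 90 < maxord then letterAddLoopA (result ++ ['A']) (maxord - 26) else (result, maxord)
termination_by maxord.toNat
decreasing_by omega

def letter_add (letter : String) (number : Int) : String :=
  let maxord : Int := ((letter.toList.headD ' ').toNat : Int) + number
  let p := letterAddLoopA [] maxord
  String.mk (p.1 ++ [Char.ofNat p.2.toNat])

-- ===== PORT B =====
def letter_add_alt (letter : String) (number : Int) : String :=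
  let total : Int := ((letter.toList.headD ' ').toNat : Int) + number
  let k : Int := if total ≤ 90 then 0 else PySem.Int.floordiv (total - 91) 26 + 1
  String.mk (List.replicate k.toNat 'A' ++ [Char.ofNat (total - 26 * k).toNat])

-- ===== PRECONDITION & SPEC =====
-- Pre_ excludes exactly the inputs where Python A raises: ord needs a one-character
-- string (TypeError otherwise) and chr raises ValueError when ord(letter)+number < 0.
def Pre_letter_add (letter : String) (number : Int) : Prop :=
  letter.toList.length = 1 ∧ 0 ≤ ((letter.toList.headD ' ').toNat : Int) + number
instance (letter : String) (number : Int) : Decidable (Pre_letter_add letter number) := by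
  unfold Pre_letter_add; infer_instance
def pvWitness_letter_add : String × Int := ("B", 3)

def Spec_letter_add (letter : String) (number : Int) (out : String) : Prop := out = letter_add_alt letter number
instance (letter : String) (number : Int) (out : String) : Decidable (Spec_letter_add letter number out) := by unfold Spec_letter_add; infer_instance

-- ===== CLAIM (what is proved, stated in full; the proofs are below) =====
def Claim_equal_letter_add : Prop := ∀ (letter : String) (number : Int), Dom_letter_add letter number → Pre_letter_add letter number → Spec_letter_add letter number (letter_add letter number)

-- ===== LEMMAS AND PROOFS =====

-- B's closed-form prefix length, as a function of the running total.
def kOf (total : Int) : Int :=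
  if total ≤ 90 then 0 else PySem.Int.floordiv (total - 91) 26 + 1

lemma kOf_nonneg (m : Int) : 0 ≤ kOf m := by
  unfold kOf
  split_ifs with h
  · exact le_refl 0
  · rw [PySem.Int.floordiv_eq_ediv_of_pos (by norm_num)]
    omega

lemma kOf_step (m : Int) (h : 90 < m) : kOf m = kOf (m - 26) + 1 := by
  unfold kOf
  simp only [PySem.Int.floordiv_eq_ediv_of_pos (show (0:Int) < 26 by norm_num)]
  split_ifs <;> omega

lemma loopA_eq (result : List Char) (m : Int) :
    letterAddLoopA result m = (result ++ List.replicate (kOf m).toNat 'A', m - 26 * kOf m) := by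
  fun_induction letterAddLoopA result m with
  | case1 result m h ih =>
      rw [ih, kOf_step m h]
      have hk := kOf_nonneg (m - 26)
      have htn : (kOf (m - 26) + 1).toNat = (kOf (m - 26)).toNat + 1 := by omega
      simp only [Prod.mk.injEq, htn]
      refine ⟨?_, by ring⟩
      simp only [List.append_assoc, List.singleton_append]
      rw [← List.replicate_succ]
  | case2 result m h =>
      have h0 : kOf m = 0 := by unfold kOf; rw [if_pos (by omega)]
      simp [h0]

-- ===== VERDICT (by name: the statement is the Claim_ definition above) =====
theorem letter_add_spec : Claim_equal_letter_add := by
  intro letter number _ _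
  unfold Spec_letter_add letter_add letter_add_alt
  simp only [loopA_eq, kOf, List.nil_append]
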